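-- pv_equiv track=rewrite | github.com/Helhaouti/Advent.Of.Code | 2023/2/main.py | determine_the_power
-- ===== SOURCE A (Python) =====
-- def determine_the_power(data: dict[int, str]) -> int:
--     flattened_data = [item for sublist in data["results"] for item in sublist]
--     power = 1
--
--     grouped_data = {}
--     for item, category in flattened_data:
--         grouped_data.setdefault(category, []).append(item)
--
--     for _, values in grouped_data.items():
--         largest_value = max(values)
--         power *= largest_value
--
--     return power
-- ===== SOURCE B (Python) =====
-- def determine_the_power(data: dict[int, str]) -> int:
--     best = {}
--     for sublist in data["results"]:
--         for item, category in sublist: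
--             if category not in best or item > best[category]:
--                 best[category] = item
--     power = 1
--     for value in best.values():
--         power *= value
--     return power
-- ===== Notes on version B (the rewrite author's own statement) =====
-- stated objective: simpler
-- what changed: B keeps a single dict of running per-category maxima updated in one pass over the nested data and multiplies its values, instead of A's flatten-then-group-into-lists-then-max-each-group pipeline.
import Mathlib
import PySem

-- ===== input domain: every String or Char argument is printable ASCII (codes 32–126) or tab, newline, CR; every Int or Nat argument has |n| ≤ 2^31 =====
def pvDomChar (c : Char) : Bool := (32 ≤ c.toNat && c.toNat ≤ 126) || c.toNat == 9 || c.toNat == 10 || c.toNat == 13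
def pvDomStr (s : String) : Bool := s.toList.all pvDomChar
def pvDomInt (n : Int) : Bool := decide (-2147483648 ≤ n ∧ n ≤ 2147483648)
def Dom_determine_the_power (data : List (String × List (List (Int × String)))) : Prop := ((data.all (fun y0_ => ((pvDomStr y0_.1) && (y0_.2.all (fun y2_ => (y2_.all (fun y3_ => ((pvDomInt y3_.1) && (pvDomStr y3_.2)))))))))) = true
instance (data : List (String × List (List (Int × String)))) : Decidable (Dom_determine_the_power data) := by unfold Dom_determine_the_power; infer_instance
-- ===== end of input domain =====

-- B replaces A's flatten, group-into-lists, then max-per-group pipeline by a single pass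
-- that maintains only the running maximum per category; return values proved equal.

-- ===== PORT A =====
-- literal port of A: flatten, group into a dict of lists (setdefault+append = modify), then
-- multiply max(values) per group; `none => 0` marks the KeyError on a missing "results" key
-- (excluded by Pre_); the inner `none => power` branch is unreachable (groups are nonempty).
def determine_the_power (data : List (String × List (List (Int × String)))) : Int :=
  match (PySem.Dict.mk data).get? "results" with
  | none => 0
  | some results =>
    let flattened_data := results.flatMap (fun sublist => sublist)
    let grouped_data := flattened_data.foldl
      (fun d p => d.modify p.2 [] (fun vs => vs ++ [p.1])) PySem.Dict.empty
    grouped_data.items.foldl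
      (fun power kv =>
        match PySem.List.max? kv.2 (fun x => x) with
        | some largest_value => power * largest_value
        | none => power) 1

-- ===== PORT B =====
-- literal port of Source B: one nested pass keeping best[category] = running max, then product.
def determine_the_power_alt (data : List (String × List (List (Int × String)))) : Int :=
  match (PySem.Dict.mk data).get? "results" with
  | none => 0
  | some results =>
    let best := results.foldl
      (fun b sublist => sublist.foldl
        (fun b p => if b.contains p.2 = false ∨ p.1 > b.getD p.2 0 then b.insert p.2 p.1 else b)
        b)
      (PySem.Dict.empty : PySem.Dict String Int)
    best.values.foldl (fun power value => power * value) 1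

-- ===== PRECONDITION & SPEC =====
-- Pre_ excludes exactly the inputs with no "results" key, on which A raises KeyError.
def Pre_determine_the_power (data : List (String × List (List (Int × String)))) : Prop :=
  "results" ∈ data.map (fun x => x.1)
instance (data : List (String × List (List (Int × String)))) : Decidable (Pre_determine_the_power data) := by unfold Pre_determine_the_power; infer_instance

def pvWitness_determine_the_power : (List (String × List (List (Int × String)))) :=
  [("results", [[(3, "red"), (5, "blue")], [(4, "red")]])]

def Spec_determine_the_power (data : List (String × List (List (Int × String)))) (out : Int) : Prop := out = determine_the_power_alt data
instance (data : List (String × List (List (Int × String)))) (out : Int) : Decidable (Spec_determine_the_power data out) := by unfold Spec_determine_the_power; infer_instance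

-- ===== CLAIM (what is proved, stated in full; the proofs are below) =====
def Claim_equal_determine_the_power : Prop := ∀ (data : List (String × List (List (Int × String)))), Dom_determine_the_power data → Pre_determine_the_power data → Spec_determine_the_power data (determine_the_power data)

-- ===== LEMMAS AND PROOFS =====

-- running maximum of a nonempty list, as both programs compute it
def pvMx (vs : List Int) : Int := (PySem.List.max? vs (fun x => x)).getD 0

-- the invariant tying A's dict of lists to B's dict of running maxima
def pvInv (d : PySem.Dict String (List Int)) (b : PySem.Dict String Int) : Prop :=
  d.keys.Nodup ∧ (∀ p ∈ d.items, p.2 ≠ []) ∧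
    b.items = d.items.map (fun q => (q.1, pvMx q.2))

theorem pvMx_append (vs : List Int) (x : Int) (h : vs ≠ []) :
    pvMx (vs ++ [x]) = if x > pvMx vs then x else pvMx vs := by
  obtain ⟨v, t, rfl⟩ := List.exists_cons_of_ne_nil h
  simp only [pvMx, List.cons_append, PySem.List.max?_id_cons, Option.getD_some,
    List.foldl_append, List.foldl_cons, List.foldl_nil]
  rcases le_or_gt x (List.foldl max v t) with hle | hlt
  · rw [max_eq_left hle, if_neg (by omega)]
  · rw [max_eq_right (le_of_lt hlt), if_pos hlt]

theorem pvInv_keys {d : PySem.Dict String (List Int)} {b : PySem.Dict String Int}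
    (h : pvInv d b) : b.keys = d.keys := by
  obtain ⟨-, -, hitems⟩ := h
  simp only [PySem.Dict.keys, hitems, List.map_map]
  rfl

theorem pvInv_contains {d : PySem.Dict String (List Int)} {b : PySem.Dict String Int}
    (h : pvInv d b) (k : String) : b.contains k = d.contains k := by
  rw [PySem.Dict.contains_eq_decide_mem_keys, PySem.Dict.contains_eq_decide_mem_keys,
    pvInv_keys h]

theorem pvInv_step (d : PySem.Dict String (List Int)) (b : PySem.Dict String Int)
    (p : Int × String) (h : pvInv d b) :
    pvInv (d.modify p.2 [] (fun vs => vs ++ [p.1]))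
      (if b.contains p.2 = false ∨ p.1 > b.getD p.2 0 then b.insert p.2 p.1 else b) := by
  obtain ⟨hnd, hne, hitems⟩ := h
  rw [PySem.Dict.modify]
  by_cases hc : d.contains p.2 = true
  · -- key already present
    have hb : b.contains p.2 = true := by rw [pvInv_contains ⟨hnd, hne, hitems⟩]; exact hc
    have hget : ∃ vs, d.get? p.2 = some vs := by
      rcases hx : d.get? p.2 with - | vs
      · rw [PySem.Dict.get?_eq_none_iff_not_mem_keys] at hx
        rw [PySem.Dict.contains_iff_mem_keys] at hc
        exact absurd hc hx
      · exact ⟨vs, rfl⟩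
    obtain ⟨vs, hvs⟩ := hget
    have hdg : d.getD p.2 [] = vs := PySem.Dict.getD_of_get?_eq_some d [] hvs
    have hmem : (p.2, vs) ∈ d.items := PySem.Dict.mem_items_of_get?_eq_some d hvs
    have hvne : vs ≠ [] := hne _ hmem
    have hbnd : b.keys.Nodup := by rw [pvInv_keys ⟨hnd, hne, hitems⟩]; exact hnd
    have hbg : b.getD p.2 0 = pvMx vs := by
      have hm : (p.2, pvMx vs) ∈ b.items := by
        rw [hitems]; exact List.mem_map.mpr ⟨(p.2, vs), hmem, rfl⟩
      exact PySem.Dict.getD_of_mem_items b hm hbnd 0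
    have hval : ∀ q ∈ d.items, q.1 = p.2 → q.2 = vs := by
      intro q hq hk
      have h1 : d.get? q.1 = some q.2 := PySem.Dict.get?_of_mem_items d hq hnd
      rw [hk, hvs] at h1; exact (Option.some_inj.mp h1).symm
    refine ⟨?_, ?_, ?_⟩
    · rw [PySem.Dict.keys_insert_of_contains _ _ hc]; exact hnd
    · intro q hq
      rw [PySem.Dict.items_insert_of_contains _ _ hc] at hq
      obtain ⟨q', hq', rfl⟩ := List.mem_map.mp hq
      by_cases hk : (q'.1 == p.2) = true
      · rw [if_pos hk]; simp
      · rw [if_neg hk]; exact hne _ hq'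
    · rw [PySem.Dict.items_insert_of_contains _ _ hc, hdg]
      by_cases hgt : p.1 > b.getD p.2 0
      · rw [if_pos (Or.inr hgt), PySem.Dict.items_insert_of_contains _ _ hb, hitems,
          List.map_map, List.map_map]
        apply List.map_congr_left
        intro q hq
        rw [hbg] at hgt
        by_cases hk : q.1 = p.2
        · simp [Function.comp, hk, pvMx_append vs p.1 hvne, hgt]
        · simp [Function.comp, hk]
      · rw [if_neg (fun hcase => hcase.elim (fun h1 => by simp [hb] at h1) (fun h1 => hgt h1)),
          hitems, List.map_map]
        apply List.map_congr_left
        intro q hq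
        rw [hbg] at hgt
        by_cases hk : q.1 = p.2
        · have hq2 : q.2 = vs := hval q hq hk
          simp [Function.comp, hk, hq2, pvMx_append vs p.1 hvne, hgt]
        · simp [Function.comp, hk]
  · -- fresh key
    have hc' : d.contains p.2 = false := by simpa using hc
    have hb : b.contains p.2 = false := by rw [pvInv_contains ⟨hnd, hne, hitems⟩]; exact hc'
    have hdg : d.getD p.2 [] = [] := PySem.Dict.getD_of_not_contains d [] hc'
    refine ⟨?_, ?_, ?_⟩
    · rw [PySem.Dict.keys_insert_of_not_contains _ _ hc']
      refine List.nodup_append.mpr ⟨hnd, List.nodup_singleton _, ?_⟩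
      intro a ha b2 hb2 heq
      rw [List.mem_singleton] at hb2; subst hb2; subst heq
      have ha' : d.contains p.2 = true := (PySem.Dict.contains_iff_mem_keys _ _).mpr ha
      simp [hc'] at ha'
    · intro q hq
      rw [PySem.Dict.items_insert_of_not_contains _ _ hc'] at hq
      rcases List.mem_append.mp hq with hq | hq
      · exact hne _ hq
      · rw [List.mem_singleton] at hq; subst hq; simp [hdg]
    · rw [if_pos (Or.inl hb)]
      rw [PySem.Dict.items_insert_of_not_contains _ _ hb,
        PySem.Dict.items_insert_of_not_contains _ _ hc', hitems, List.map_append]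
      simp [hdg, pvMx, PySem.List.max?_id_cons]

theorem pvInv_fold (l : List (Int × String)) (d : PySem.Dict String (List Int))
    (b : PySem.Dict String Int) (h : pvInv d b) :
    pvInv (l.foldl (fun d p => d.modify p.2 [] (fun vs => vs ++ [p.1])) d)
      (l.foldl (fun b p =>
        if b.contains p.2 = false ∨ p.1 > b.getD p.2 0 then b.insert p.2 p.1 else b) b) := by
  induction l generalizing d b with
  | nil => exact h
  | cons p t ih => exact ih _ _ (pvInv_step d b p h)

theorem pvInv_empty : pvInv PySem.Dict.empty PySem.Dict.empty := by
  refine ⟨?_, ?_, ?_⟩ <;> simp [PySem.Dict.empty, PySem.Dict.keys]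

theorem pv_prod_eq (items : List (String × List Int)) (hne : ∀ p ∈ items, p.2 ≠ [])
    (acc : Int) :
    items.foldl (fun power kv =>
        match PySem.List.max? kv.2 (fun x => x) with
        | some largest_value => power * largest_value
        | none => power) acc
      = (items.map (fun q => (q.1, pvMx q.2))).foldl
          (fun power kv => power * kv.2) acc := by
  induction items generalizing acc with
  | nil => rfl
  | cons p t ih =>
    simp only [List.foldl_cons, List.map_cons]
    have hpne := hne p (List.mem_cons_self)
    obtain ⟨v, t', hv⟩ := List.exists_cons_of_ne_nil hpne
    rw [hv, PySem.List.max?_id_cons]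
    have hmx : pvMx (v :: t') = t'.foldl max v := by
      simp [pvMx, PySem.List.max?_id_cons]
    rw [hmx]
    exact ih (fun q hq => hne q (List.mem_cons_of_mem _ hq)) _

theorem pv_values_fold (b : PySem.Dict String Int) (acc : Int) :
    b.values.foldl (fun power value => power * value) acc
      = b.items.foldl (fun power kv => power * kv.2) acc := by
  simp only [PySem.Dict.values]
  rw [List.foldl_map]

-- nested fold over sublists = fold over the flattened list
theorem pv_foldl_flatten {α β : Type} (f : β → α → β) (L : List (List α)) (b : β) :
    L.foldl (fun b l => l.foldl f b) b = (L.flatMap (fun s => s)).foldl f b := by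
  induction L generalizing b with
  | nil => rfl
  | cons l t ih => simp [List.foldl_append, ih]

-- ===== VERDICT (by name: the statement is the Claim_ definition above) =====
theorem determine_the_power_spec : Claim_equal_determine_the_power := by
  intro data _hdom hpre
  unfold Spec_determine_the_power determine_the_power determine_the_power_alt
  rcases hres : (PySem.Dict.mk data).get? "results" with - | results
  · rfl
  · simp only
    rw [pv_foldl_flatten]
    have hinv := pvInv_fold (results.flatMap (fun s => s)) _ _ pvInv_empty
    obtain ⟨hnd, hne, hitems⟩ := hinv
    rw [pv_values_fold, hitems, pv_prod_eq _ hne]
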